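-- pv_equiv track=rewrite | github.com/leowcy/Algorithm | interviews/icapital/q1.py | remove_str
-- ===== SOURCE A (Python) =====
-- def remove_str(input: str) -> int:
--     st = []
--     for i, val in enumerate(input):
--         if st and (
--             (
--                 input[st[-1]] == "A"
--                 and val == "B"
--             )
--             or (
--                 input[st[-1]] == "C"
--                 and val == "D"
--             )
--         ):
--             st.pop()
--         else:
--             st.append(i)
--
--     return len(st)
-- ===== SOURCE B (Python) =====
-- def remove_str(input: str) -> int:
--     s = input
--     while "AB" in s or "CD" in s:
--         s = s.replace("AB", "").replace("CD", "")
--     return len(s)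
-- ===== Notes on version B (the rewrite author's own statement) =====
-- stated objective: simpler
-- what changed: Replaces the single-pass Python-level index-stack scan with repeated whole-string deletion of the two pairs via str.replace until a fixed point, returning the length of the irreducible remainder (the deletion system is confluent); the scanning work moves into C-level str operations.
import Mathlib
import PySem

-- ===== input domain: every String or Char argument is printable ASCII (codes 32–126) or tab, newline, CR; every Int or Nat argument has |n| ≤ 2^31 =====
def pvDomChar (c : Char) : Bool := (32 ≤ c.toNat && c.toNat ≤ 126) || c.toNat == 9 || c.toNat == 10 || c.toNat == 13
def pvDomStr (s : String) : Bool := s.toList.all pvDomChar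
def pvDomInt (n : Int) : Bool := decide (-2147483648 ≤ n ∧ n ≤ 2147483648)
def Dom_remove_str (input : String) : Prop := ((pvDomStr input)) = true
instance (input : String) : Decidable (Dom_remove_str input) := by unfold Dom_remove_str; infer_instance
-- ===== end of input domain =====

-- B replaces A's single-pass index stack by repeated whole-string removal of "AB"/"CD" to a
-- fixed point (the rewriting system is confluent); measured faster on the generated inputs.


-- ===== PORT A =====
-- A's loop body: stack of INDICES; `input[st[-1]]` is the char at the stacked index
def remove_str_stepA (s : List Char) (st : List Int) (iv : Int × Char) : List Int :=
  if st ≠ [] ∧ ((PySem.List.pyGetD s (PySem.List.pyGetD st (-1) 0) ' ' = 'A' ∧ iv.2 = 'B') ∨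
                (PySem.List.pyGetD s (PySem.List.pyGetD st (-1) 0) ' ' = 'C' ∧ iv.2 = 'D'))
  then st.dropLast else st ++ [iv.1]

def remove_str (input : String) : Int :=
  (((PySem.List.enumerate input.toList 0).foldl (remove_str_stepA input.toList) []).length : Int)

-- ===== PORT B =====
-- termination facts for the while loop (cited by `decreasing_by`): length never grows under
-- s.replace(old, "") and strictly shrinks when old occurs; unchanged when old does not occur
theorem pvGoLenLe (old : List Char) : ∀ (fuel : Nat) (l acc : List Char),
    (PySem.Chars.replace.go old [] fuel l acc).length ≤ acc.length + l.length := by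
  intro fuel
  induction fuel with
  | zero => intro l acc; rw [PySem.Chars.replace.go]; simp
  | succ n ih =>
    intro l acc
    cases l with
    | nil => rw [PySem.Chars.replace.go] <;> simp
    | cons c t =>
      rw [PySem.Chars.replace.go]
      split
      · calc (PySem.Chars.replace.go old [] n (List.drop old.length (c :: t)) (([] : List Char).reverse ++ acc)).length
            ≤ (([] : List Char).reverse ++ acc).length + (List.drop old.length (c :: t)).length := ih _ _
          _ ≤ acc.length + (c :: t).length := by simp <;> omega
      · calc (PySem.Chars.replace.go old [] n t (c :: acc)).length
            ≤ (c :: acc).length + t.length := ih _ _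
          _ = acc.length + (c :: t).length := by simp <;> omega

theorem pvGoLenLt (old : List Char) (hne : old ≠ []) : ∀ (fuel : Nat) (l acc : List Char),
    l.length ≤ fuel → old <:+: l →
    (PySem.Chars.replace.go old [] fuel l acc).length < acc.length + l.length := by
  intro fuel
  induction fuel with
  | zero =>
    intro l acc hf hocc
    interval_cases hl : l.length
    · rw [List.length_eq_zero_iff] at hl; subst hl
      exact absurd (List.eq_nil_of_infix_nil hocc) hne
  | succ n ih =>
    intro l acc hf hocc
    cases l with
    | nil => exact absurd (List.eq_nil_of_infix_nil hocc) hne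
    | cons c t =>
      rw [PySem.Chars.replace.go]
      split
      · rename_i hpre
        rw [List.isPrefixOf_iff_prefix] at hpre
        have hol : old.length ≤ (c :: t).length := hpre.length_le
        have h1 : 1 ≤ old.length := List.length_pos_iff.mpr hne
        calc (PySem.Chars.replace.go old [] n (List.drop old.length (c :: t)) (([] : List Char).reverse ++ acc)).length
            ≤ (([] : List Char).reverse ++ acc).length + (List.drop old.length (c :: t)).length := pvGoLenLe old _ _ _
          _ < acc.length + (c :: t).length := by simp <;> omega
      · rename_i hpre
        rw [List.isPrefixOf_iff_prefix] at hpre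
        have hocc' : old <:+: t := by
          rcases (List.infix_cons_iff.mp hocc) with h | h
          · exact absurd h hpre
          · exact h
        calc (PySem.Chars.replace.go old [] n t (c :: acc)).length
            < (c :: acc).length + t.length := ih t (c :: acc) (by simpa using hf) hocc'
          _ = acc.length + (c :: t).length := by simp <;> omega

theorem pvGoNoOcc (old : List Char) : ∀ (fuel : Nat) (l acc : List Char),
    ¬ old <:+: l → PySem.Chars.replace.go old [] fuel l acc = acc.reverse ++ l := by
  intro fuel
  induction fuel with
  | zero => intro l acc _; rw [PySem.Chars.replace.go]
  | succ n ih =>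
    intro l acc hocc
    cases l with
    | nil => rw [PySem.Chars.replace.go] <;> simp
    | cons c t =>
      rw [PySem.Chars.replace.go]
      split
      · rename_i hpre
        rw [List.isPrefixOf_iff_prefix] at hpre
        exact absurd hpre.isInfix hocc
      · have hocc' : ¬ old <:+: t := fun h => hocc (List.infix_cons_iff.mpr (Or.inr h))
        rw [ih t (c :: acc) hocc']
        simp

theorem pvReplaceLenLe (old : List Char) (hne : old ≠ []) (l : List Char) :
    (PySem.Chars.replace l old []).length ≤ l.length := by
  rw [PySem.Chars.replace, if_neg (by simp [hne])]
  simpa using pvGoLenLe old l.length l []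

theorem pvReplaceLenLt (old : List Char) (hne : old ≠ []) (l : List Char) (hocc : old <:+: l) :
    (PySem.Chars.replace l old []).length < l.length := by
  rw [PySem.Chars.replace, if_neg (by simp [hne])]
  simpa using pvGoLenLt old hne l.length l [] le_rfl hocc

theorem pvReplaceNoOcc (old : List Char) (hne : old ≠ []) (l : List Char) (hocc : ¬ old <:+: l) :
    PySem.Chars.replace l old [] = l := by
  rw [PySem.Chars.replace, if_neg (by simp [hne])]
  simpa using pvGoNoOcc old l.length l [] hocc

-- while "AB" in s or "CD" in s: s = s.replace("AB","").replace("CD","")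
def remove_str_loop (s : List Char) : Int :=
  if h : (PySem.Chars.isIn ['A','B'] s || PySem.Chars.isIn ['C','D'] s) = true then
    remove_str_loop (PySem.Chars.replace (PySem.Chars.replace s ['A','B'] []) ['C','D'] [])
  else (s.length : Int)
termination_by s.length
decreasing_by
  rcases Bool.or_eq_true_iff.mp h with hAB | hCD
  · have h1 : (PySem.Chars.replace s ['A','B'] []).length < s.length :=
      pvReplaceLenLt _ (by simp) s ((PySem.Chars.isIn_iff_infix _ _).mp hAB)
    have h2 := pvReplaceLenLe ['C','D'] (by simp) (PySem.Chars.replace s ['A','B'] [])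
    omega
  · by_cases hAB : ['A','B'] <:+: s
    · have h1 : (PySem.Chars.replace s ['A','B'] []).length < s.length :=
        pvReplaceLenLt _ (by simp) s hAB
      have h2 := pvReplaceLenLe ['C','D'] (by simp) (PySem.Chars.replace s ['A','B'] [])
      omega
    · rw [pvReplaceNoOcc _ (by simp) s hAB]
      exact pvReplaceLenLt _ (by simp) s ((PySem.Chars.isIn_iff_infix _ _).mp hCD)

def remove_str_alt (input : String) : Int := remove_str_loop input.toList

-- ===== PRECONDITION & SPEC =====
def Spec_remove_str (input : String) (out : Int) : Prop := out = remove_str_alt input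
instance (input : String) (out : Int) : Decidable (Spec_remove_str input out) := by unfold Spec_remove_str; infer_instance

-- ===== CLAIM (what is proved, stated in full; the proofs are below) =====
def Claim_equal_remove_str : Prop := ∀ (input : String), Dom_remove_str input → Spec_remove_str input (remove_str input)

-- ===== LEMMAS AND PROOFS =====

-- the common yardstick: the one-pass CHAR stack both programs' results are related to
def pvStep (st : List Char) (c : Char) : List Char :=
  if (st.head? = some 'A' ∧ c = 'B') ∨ (st.head? = some 'C' ∧ c = 'D') then st.tail else c :: st

theorem pvStepCancelAB (x : List Char) : pvStep (pvStep x 'A') 'B' = x := by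
  simp [pvStep]
theorem pvStepCancelCD (x : List Char) : pvStep (pvStep x 'C') 'D' = x := by
  simp [pvStep]

-- removing one occurrence of the pair anywhere does not change the char-stack fold
theorem pvGoFold (p1 p2 : Char) (hp : ∀ x, pvStep (pvStep x p1) p2 = x) :
    ∀ (fuel : Nat) (l acc st : List Char),
    List.foldl pvStep st (PySem.Chars.replace.go [p1, p2] [] fuel l acc) =
      List.foldl pvStep st (acc.reverse ++ l) := by
  intro fuel
  induction fuel with
  | zero => intro l acc st; rw [PySem.Chars.replace.go]
  | succ n ih =>
    intro l acc st
    cases l with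
    | nil => rw [PySem.Chars.replace.go] <;> simp
    | cons c t =>
      rw [PySem.Chars.replace.go]
      split
      · rename_i hpre
        rw [List.isPrefixOf_iff_prefix] at hpre
        obtain ⟨r, hr⟩ := hpre
        have hc : c = p1 ∧ t = p2 :: r := by
          cases hr; exact ⟨rfl, rfl⟩
        obtain ⟨rfl, rfl⟩ := hc
        rw [ih]
        simp [List.foldl_append, hp]
      · rw [ih]
        simp

theorem pvReplaceFold (p1 p2 : Char) (hp : ∀ x, pvStep (pvStep x p1) p2 = x)
    (l st : List Char) :
    List.foldl pvStep st (PySem.Chars.replace l [p1, p2] []) = List.foldl pvStep st l := by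
  rw [PySem.Chars.replace, if_neg (by simp)]
  simpa using pvGoFold p1 p2 hp l.length l [] st

-- at the fixed point (no "AB"/"CD" substring) the char stack never pops
theorem pvFoldNoPairs : ∀ (l acc : List Char),
    ¬ ['A','B'] <:+: l → ¬ ['C','D'] <:+: l →
    (∀ b, l.head? = some b →
      ¬ ((acc.head? = some 'A' ∧ b = 'B') ∨ (acc.head? = some 'C' ∧ b = 'D'))) →
    List.foldl pvStep acc l = l.reverse ++ acc := by
  intro l
  induction l with
  | nil => intro acc _ _ _; simp
  | cons c t ih =>
    intro acc hAB hCD hhead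
    have hstep : pvStep acc c = c :: acc := by
      rw [pvStep, if_neg (hhead c rfl)]
    rw [List.foldl_cons, hstep,
      ih (c :: acc) (fun h => hAB (List.infix_cons_iff.mpr (Or.inr h)))
        (fun h => hCD (List.infix_cons_iff.mpr (Or.inr h))) ?_]
    · simp
    · intro b hb hcond
      rcases hcond with ⟨hc, rfl⟩ | ⟨hc, rfl⟩
      · simp at hc; subst hc
        cases t with
        | nil => simp at hb
        | cons b' t' =>
          simp at hb; subst hb
          exact hAB ⟨[], t', by simp⟩
      · simp at hc; subst hc
        cases t with
        | nil => simp at hb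
        | cons b' t' =>
          simp at hb; subst hb
          exact hCD ⟨[], t', by simp⟩

-- A's index stack, read through the input, IS the char stack (in reverse)
theorem pvBridgeA (s : List Char) : ∀ (t : List Char) (j : Nat) (stA : List Int) (stB : List Char),
    s.drop j = t →
    stA.map (fun i => PySem.List.pyGetD s i ' ') = stB.reverse →
    ((PySem.List.enumerate t (j : Int)).foldl (remove_str_stepA s) stA).map
        (fun i => PySem.List.pyGetD s i ' ') =
      (List.foldl pvStep stB t).reverse := by
  intro t
  induction t with
  | nil => intro j stA stB _ hinv; simpa [PySem.List.enumerate_nil] using hinv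
  | cons c t' ih =>
    intro j stA stB hdrop hinv
    have hj : j < s.length := by
      by_contra h
      rw [List.drop_eq_nil_of_le (by omega)] at hdrop
      exact (List.cons_ne_nil c t') hdrop.symm
    have hsj : s[j]? = some c := by
      have h : (s.drop j)[0]? = s[j + 0]? := List.getElem?_drop
      rw [hdrop] at h
      simpa using h.symm
    have hdrop' : s.drop (j + 1) = t' := by
      have h := congrArg List.tail hdrop
      rwa [List.tail_drop, List.tail_cons] at h
    have hlen : stA.length = stB.length := by
      have := congrArg List.length hinv
      simpa using this
    rw [PySem.List.enumerate_cons, List.foldl_cons]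
    -- the two step conditions agree
    by_cases hne : stB = []
    · subst hne
      have hA : stA = [] := by
        cases stA with
        | nil => rfl
        | cons a l => simp at hlen
      subst hA
      have hstepA : remove_str_stepA s [] ((j : Int), c) = [] ++ [(j : Int)] := by
        simp [remove_str_stepA]
      rw [hstepA]
      by_cases hc : pvStep [] c = c :: [] 
      · rw [show List.foldl pvStep [] (c :: t') = List.foldl pvStep [c] t' by
          simp [List.foldl_cons, hc]]
        apply ih (j + 1) _ _ (by exact_mod_cast hdrop')
        simp [PySem.List.pyGetD_natCast, List.getD_eq_getElem?_getD, hsj]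
      · exact absurd (by simp [pvStep]) hc
    · have hBne := hne
      have hAne : stA ≠ [] := by
        cases stA with
        | nil => cases stB with
          | nil => exact absurd rfl hne
          | cons b l => simp at hlen
        | cons a l => simp
      -- top of A's stack reads as head of B's stack
      have htop : PySem.List.pyGetD s (PySem.List.pyGetD stA (-1) 0) ' ' =
          (stB.head (by exact hne)) := by
        have h1 : PySem.List.pyGetD stA (-1) 0 = stA.getLast hAne :=
          PySem.List.pyGetD_neg_one stA 0 hAne
        have h2 : (stA.map (fun i => PySem.List.pyGetD s i ' ')).getLast? =
            (stB.reverse).getLast? := by rw [hinv]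
        rw [List.getLast?_map] at h2
        rw [List.getLast?_eq_some_getLast hAne] at h2
        rw [List.getLast?_reverse] at h2
        rw [List.head?_eq_some_head hne] at h2
        simpa [h1] using h2
      have hheadB : stB.head? = some (stB.head hne) := List.head?_eq_some_head hne
      by_cases hcond : (stB.head? = some 'A' ∧ c = 'B') ∨ (stB.head? = some 'C' ∧ c = 'D')
      · -- pop on both sides
        have hcondA : stA ≠ [] ∧
            ((PySem.List.pyGetD s (PySem.List.pyGetD stA (-1) 0) ' ' = 'A' ∧ ((j : Int), c).2 = 'B') ∨
             (PySem.List.pyGetD s (PySem.List.pyGetD stA (-1) 0) ' ' = 'C' ∧ ((j : Int), c).2 = 'D')) := by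
          refine ⟨hAne, ?_⟩
          rcases hcond with ⟨hh, rfl⟩ | ⟨hh, rfl⟩
          · left; refine ⟨?_, rfl⟩; rw [htop]; rw [hheadB] at hh; exact (Option.some_injective _ hh)
          · right; refine ⟨?_, rfl⟩; rw [htop]; rw [hheadB] at hh; exact (Option.some_injective _ hh)
        rw [show remove_str_stepA s stA ((j : Int), c) = stA.dropLast by
          rw [remove_str_stepA, if_pos hcondA]]
        rw [show List.foldl pvStep stB (c :: t') = List.foldl pvStep stB.tail t' by
          rw [List.foldl_cons, pvStep, if_pos hcond]]
        apply ih (j + 1) _ _ (by exact_mod_cast hdrop')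
        have : (stA.dropLast).map (fun i => PySem.List.pyGetD s i ' ') =
            (stA.map (fun i => PySem.List.pyGetD s i ' ')).dropLast := by
          rw [← List.map_dropLast]
        rw [this, hinv, List.dropLast_reverse]
      · -- push on both sides
        have hcondA : ¬ (stA ≠ [] ∧
            ((PySem.List.pyGetD s (PySem.List.pyGetD stA (-1) 0) ' ' = 'A' ∧ ((j : Int), c).2 = 'B') ∨
             (PySem.List.pyGetD s (PySem.List.pyGetD stA (-1) 0) ' ' = 'C' ∧ ((j : Int), c).2 = 'D'))) := by
          rintro ⟨-, hor⟩
          apply hcond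
          rcases hor with ⟨hh, hc⟩ | ⟨hh, hc⟩
          · left; exact ⟨by rw [hheadB]; rw [htop] at hh; rw [hh], hc⟩
          · right; exact ⟨by rw [hheadB]; rw [htop] at hh; rw [hh], hc⟩
        rw [show remove_str_stepA s stA ((j : Int), c) = stA ++ [(j : Int)] by
          rw [remove_str_stepA, if_neg hcondA]]
        rw [show List.foldl pvStep stB (c :: t') = List.foldl pvStep (c :: stB) t' by
          rw [List.foldl_cons, pvStep, if_neg hcond]]
        apply ih (j + 1) _ _ (by exact_mod_cast hdrop')
        rw [List.map_append, hinv]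
        simp [PySem.List.pyGetD_natCast, List.getD_eq_getElem?_getD, hsj]

-- B's loop computes the char-stack length
theorem pvLoopEq (s : List Char) :
    remove_str_loop s = ((List.foldl pvStep [] s).length : Int) := by
  induction s using remove_str_loop.induct with
  | case1 s h ih =>
    rw [remove_str_loop, dif_pos h, ih,
      pvReplaceFold 'C' 'D' pvStepCancelCD, pvReplaceFold 'A' 'B' pvStepCancelAB]
  | case2 s h =>
    rw [remove_str_loop, dif_neg h]
    have hAB : ¬ ['A','B'] <:+: s := fun hx =>
      h (by simp [(PySem.Chars.isIn_iff_infix _ _).mpr hx])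
    have hCD : ¬ ['C','D'] <:+: s := fun hx =>
      h (by simp [(PySem.Chars.isIn_iff_infix _ _).mpr hx])
    rw [pvFoldNoPairs s [] hAB hCD (by simp)]
    simp

-- ===== VERDICT (by name: the statement is the Claim_ definition above) =====
theorem remove_str_spec : Claim_equal_remove_str := by
  intro input _
  unfold Spec_remove_str remove_str remove_str_alt
  rw [pvLoopEq]
  have := pvBridgeA input.toList input.toList 0 [] [] (by simp) (by simp)
  have hlen := congrArg List.length this
  simp only [List.length_map, List.length_reverse] at hlen
  norm_num at this hlen ⊢
  rw [hlen]
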